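-- pv_equiv track=rewrite | github.com/nasa/ziggy | src/main/python/hdf5mi/hdf5.py | _struct_array_location
-- ===== SOURCE A (Python) =====
-- def _struct_array_location(group_name, array_dims):
--
--     # get the zero-based subscripts out of the group name
--     name_split = group_name.split("-")
--     name_split.pop(0)
--     subscript = list()
--     for subscript_string in name_split:
--         subscript.append(int(subscript_string))
--
--     # convert to an index using row-major indexing: this means that
--     # (0,0,0) is followed by (0,0,1) ... (0,0,M-1); then (0,1,0),
--     # (0,1,1) ... (0,1,M) ... (0,N,M), (1,0,0), (1,0,1)...
--
--     ind = 0
--     for i in range(len(subscript)):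
--         if i > 0:
--             ind *= array_dims[i-1]
--         ind += subscript[i]
--
--     return ind
-- ===== SOURCE B (Python) =====
-- def _struct_array_location(group_name, array_dims):
--     # parse zero-based subscripts from the group name
--     subscript = [int(t) for t in group_name.split("-")[1:]]
--     # stride table: stride[i] = product of array_dims[i : len(subscript)-1]
--     # (the last dimension is unused, exactly as in row-major indexing)
--     dims_used = array_dims[:len(subscript) - 1]
--     strides = [1]
--     for d in reversed(dims_used):
--         strides.append(strides[-1] * d)
--     strides.reverse()
--     # dot product of subscripts with strides
--     return sum(s * m for s, m in zip(subscript, strides))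
-- ===== Notes on version B (the rewrite author's own statement) =====
-- stated objective: alternative
-- what changed: A's fused Horner multiply-add loop is replaced by precomputing a stride table (reverse cumulative products of the used dimensions, built in one pass over the reversed dims slice) and then taking the dot product of the subscripts with it.
import Mathlib
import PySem

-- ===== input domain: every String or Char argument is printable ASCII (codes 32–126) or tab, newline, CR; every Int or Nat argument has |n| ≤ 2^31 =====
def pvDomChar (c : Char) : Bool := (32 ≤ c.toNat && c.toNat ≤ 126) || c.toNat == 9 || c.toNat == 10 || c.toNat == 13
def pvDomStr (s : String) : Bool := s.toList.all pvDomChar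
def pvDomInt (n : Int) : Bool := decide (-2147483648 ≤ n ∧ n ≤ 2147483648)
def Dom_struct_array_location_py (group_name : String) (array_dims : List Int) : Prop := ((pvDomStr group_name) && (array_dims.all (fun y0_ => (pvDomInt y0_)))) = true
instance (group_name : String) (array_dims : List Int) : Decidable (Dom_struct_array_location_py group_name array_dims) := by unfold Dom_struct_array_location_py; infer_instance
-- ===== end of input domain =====

-- B replaces A's fused Horner multiply-add loop by a precomputed stride table
-- (reverse cumulative products of the used dimensions) followed by a dot product
-- with the subscripts (objective: alternative decomposition, same cost).

-- ===== PORT A =====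
-- name_split = group_name.split("-"); name_split.pop(0); subscript = [int(t) …]
-- (split sep "-" is nonempty, so split? is some; int() is total under Pre_, hence getD 0)
def struct_array_location_py (group_name : String) (array_dims : List Int) : Int :=
  let name_split := ((PySem.Str.split? group_name "-").getD []).drop 1
  let subscript := name_split.map (fun t => (PySem.Int.ofStr? t).getD 0)
  (PySem.List.pyRange 0 (subscript.length : Int) 1).foldl
    (fun ind i =>
      (if i > 0 then ind * PySem.List.pyGetD array_dims (i - 1) 0 else ind)
        + PySem.List.pyGetD subscript i 0)
    0

-- ===== PORT B =====
def struct_array_location_py_alt (group_name : String) (array_dims : List Int) : Int :=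
  let subscript := (((PySem.Str.split? group_name "-").getD []).drop 1).map
    (fun t => (PySem.Int.ofStr? t).getD 0)
  let dims_used := PySem.List.slice array_dims none (some ((subscript.length : Int) - 1))
  let strides := dims_used.reverse.foldl
    (fun acc d => acc ++ [PySem.List.pyGetD acc (-1) 0 * d]) [1]
  ((subscript.zip strides.reverse).map (fun p => p.1 * p.2)).sum

-- ===== PRECONDITION & SPEC =====
-- Pre_ excludes exactly the inputs where the Python A raises: a subscript token
-- int() cannot parse (ValueError), or more than len(array_dims)+1 subscripts
-- (IndexError on array_dims[i-1]).
def Pre_struct_array_location_py (group_name : String) (array_dims : List Int) : Prop :=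
  (∀ t ∈ ((PySem.Str.split? group_name "-").getD []).drop 1, PySem.Int.ofStr? t ≠ none) ∧
  (((PySem.Str.split? group_name "-").getD []).drop 1).length ≤ array_dims.length + 1
instance (group_name : String) (array_dims : List Int) : Decidable (Pre_struct_array_location_py group_name array_dims) := by unfold Pre_struct_array_location_py; infer_instance

def pvWitness_struct_array_location_py : String × List Int := ("g-2-1-3", [4, 5, 6])

def Spec_struct_array_location_py (group_name : String) (array_dims : List Int) (out : Int) : Prop := out = struct_array_location_py_alt group_name array_dims
instance (group_name : String) (array_dims : List Int) (out : Int) : Decidable (Spec_struct_array_location_py group_name array_dims out) := by unfold Spec_struct_array_location_py; infer_instance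

-- ===== CLAIM (what is proved, stated in full; the proofs are below) =====
def Claim_equal_struct_array_location_py : Prop := ∀ (group_name : String) (array_dims : List Int), Dom_struct_array_location_py group_name array_dims → Pre_struct_array_location_py group_name array_dims → Spec_struct_array_location_py group_name array_dims (struct_array_location_py group_name array_dims)


-- ===== LEMMAS AND PROOFS =====

-- A's loop as structural recursion: hornerAux acc ds xs folds acc := acc*d + x
-- over the parallel lists ds (dims, lagging one position) and xs (tail subscripts).
def hornerAux : Int → List Int → List Int → Int
  | acc, _, [] => acc
  | acc, [], _ :: _ => acc          -- unreachable under xs.length ≤ ds.length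
  | acc, d :: ds, x :: xs => hornerAux (acc * d + x) ds xs

-- suffix-product table: pvStr t = [∏t, ∏t.tail, …, 1]  (length t.length + 1)
def pvStr : List Int → List Int
  | [] => [1]
  | d :: t => (d * (pvStr t).headD 1) :: pvStr t

theorem pvStr_ne_nil (t : List Int) : pvStr t ≠ [] := by
  cases t <;> simp [pvStr]

-- B's strides fold builds exactly (pvStr t).reverse, with last element ∏ t
theorem strides_fold (t : List Int) :
    t.reverse.foldl (fun acc d => acc ++ [PySem.List.pyGetD acc (-1) 0 * d]) [1]
      = (pvStr t).reverse := by
  induction t with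
  | nil => simp [pvStr]
  | cons d t ih =>
      rw [List.reverse_cons, List.foldl_append, ih]
      cases h : pvStr t with
      | nil => exact absurd h (pvStr_ne_nil t)
      | cons a l =>
          simp only [List.foldl_cons, List.foldl_nil, pvStr, h,
            List.reverse_cons, PySem.List.pyGetD_neg_one_append_singleton,
            List.headD_cons]
          rw [mul_comm]

-- dot product as B computes it
def pvDot (xs ms : List Int) : Int := ((xs.zip ms).map (fun p => p.1 * p.2)).sum

-- Horner with accumulator = acc·(head of suffix products) + dot of tail strides
theorem hornerAux_eq_dot (xs : List Int) :
    ∀ (ds : List Int) (acc : Int), xs.length ≤ ds.length →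
    hornerAux acc ds xs
      = acc * (pvStr (ds.take xs.length)).headD 1
        + pvDot xs (pvStr (ds.take xs.length)).tail := by
  induction xs with
  | nil => intro ds acc _; simp [hornerAux, pvStr, pvDot]
  | cons x xs ih =>
      intro ds acc h
      cases ds with
      | nil => simp at h
      | cons d ds =>
          have h' : xs.length ≤ ds.length := by simpa using h
          have hrec := ih ds (acc * d + x) h'
          cases hp : pvStr (ds.take xs.length) with
          | nil => exact absurd hp (pvStr_ne_nil _)
          | cons m ms =>
              rw [hp] at hrec
              simp only [List.length_cons, List.take_succ_cons, pvStr, hp,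
                List.headD_cons, List.tail_cons] at hrec ⊢
              simp only [hornerAux, hrec, pvDot, List.zip_cons_cons,
                List.map_cons, List.sum_cons]
              ring

-- peel the last index off A's fold: one extra range step multiplies by ds[k-1]
-- and adds s[k];  hornerAux appends the same step on the right
theorem hornerAux_append (y : Int) :
    ∀ (xs ds : List Int) (acc : Int), xs.length < ds.length →
    hornerAux acc ds (xs ++ [y])
      = hornerAux acc ds xs * ds.getD xs.length 0 + y := by
  intro xs
  induction xs with
  | nil =>
      intro ds acc h
      cases ds with
      | nil => simp at h
      | cons d ds => simp [hornerAux]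
  | cons x xs ih =>
      intro ds acc h
      cases ds with
      | nil => simp at h
      | cons d ds =>
          have h' : xs.length < ds.length := by simpa using h
          simp [hornerAux, ih ds (acc * d + x) h']

-- A's foldl over range(k) equals hornerAux over the first k subscripts
theorem foldA_eq_hornerAux (s ds : List Int) (hlen : s.length ≤ ds.length + 1) :
    ∀ k : Nat, 1 ≤ k → k ≤ s.length →
    (PySem.List.pyRange 0 (k : Int) 1).foldl
      (fun ind i =>
        (if i > 0 then ind * PySem.List.pyGetD ds (i - 1) 0 else ind)
          + PySem.List.pyGetD s i 0) 0
      = hornerAux (s.getD 0 0) ds ((s.drop 1).take (k - 1)) := by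
  intro k
  induction k with
  | zero => intro h _; omega
  | succ k ih =>
      intro _ hk
      by_cases hk1 : k = 0
      · subst hk1
        have h01 : ((1 : Nat) : Int) = 0 + 1 := by norm_num
        rw [h01, PySem.List.pyRange_one_succ_right (by norm_num)]
        simp [hornerAux, PySem.List.pyGetD_zero]
      · have hk' : 1 ≤ k := by omega
        have hkle : k ≤ s.length := by omega
        have hk2 : k < s.length := by omega
        have hcast : ((k + 1 : Nat) : Int) = (k : Int) + 1 := by push_cast; ring
        rw [hcast, PySem.List.pyRange_one_succ_right (by positivity),
          List.foldl_append, ih hk' hkle]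
        have hkpos : ((k : Int) > 0) := by exact_mod_cast hk'
        have hsub : ((k : Int) - 1) = ((k - 1 : Nat) : Int) := by
          push_cast [hk']; ring
        have hk3 : k - 1 < (s.drop 1).length := by
          simp only [List.length_drop]; omega
        have htake : (s.drop 1).take k = (s.drop 1).take (k - 1) ++ [s.getD k 0] := by
          rw [show k = (k - 1) + 1 by omega, List.take_add_one,
            List.getElem?_eq_getElem hk3]
          simp [List.getD_eq_getElem?_getD,
            List.getElem?_eq_getElem (show k - 1 + 1 < s.length by omega)]
        have hlt : ((s.drop 1).take (k - 1)).length < ds.length := by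
          simp only [List.length_take, List.length_drop]
          omega
        have hlen' : ((s.drop 1).take (k - 1)).length = k - 1 := by
          simp only [List.length_take, List.length_drop]
          omega
        simp only [List.foldl_cons, List.foldl_nil, Nat.add_sub_cancel]
        rw [if_pos hkpos, hsub, PySem.List.pyGetD_natCast,
          PySem.List.pyGetD_natCast, htake, hornerAux_append _ _ _ _ hlt, hlen']

-- final assembly: A's loop value = B's dot product with the stride table
theorem main_eq (s ds : List Int) (hlen : s.length ≤ ds.length + 1) :
    (PySem.List.pyRange 0 (s.length : Int) 1).foldl
      (fun ind i =>
        (if i > 0 then ind * PySem.List.pyGetD ds (i - 1) 0 else ind)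
          + PySem.List.pyGetD s i 0) 0
      = pvDot s
          ((PySem.List.slice ds none (some ((s.length : Int) - 1))).reverse.foldl
            (fun acc d => acc ++ [PySem.List.pyGetD acc (-1) 0 * d]) [1]).reverse := by
  cases s with
  | nil =>
      rw [show ((([] : List Int)).length : Int) = 0 by simp,
        PySem.List.pyRange_one_eq_nil le_rfl]
      simp [pvDot]
  | cons x xs =>
      have hslice : PySem.List.slice ds none (some (((x :: xs).length : Int) - 1))
          = ds.take xs.length := by
        rw [show (((x :: xs).length : Int) - 1) = ((xs.length : Nat) : Int) by
          simp, PySem.List.slice_to_natCast]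
      rw [hslice, strides_fold, List.reverse_reverse]
      have h1 : xs.length ≤ ds.length := by simpa using hlen
      have hfold := foldA_eq_hornerAux (x :: xs) ds hlen (x :: xs).length
        (by simp) (le_refl _)
      simp only [List.length_cons, Nat.add_sub_cancel, List.drop_one,
        List.tail_cons, List.getD_cons_zero, List.take_length] at hfold
      rw [show (((x :: xs).length : Nat) : Int) = ((xs.length + 1 : Nat) : Int) by
        simp, hfold, hornerAux_eq_dot xs ds x h1]
      cases hp : pvStr (ds.take xs.length) with
      | nil => exact absurd hp (pvStr_ne_nil _)
      | cons m ms => simp [pvDot]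

-- ===== VERDICT (by name: the statement is the Claim_ definition above) =====
theorem struct_array_location_py_spec : Claim_equal_struct_array_location_py := by
  intro g ds _ hpre
  unfold Spec_struct_array_location_py struct_array_location_py struct_array_location_py_alt
  exact main_eq _ ds (by simpa using hpre.2)
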